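/- PORTED by tools/port_fixed.py from Prog/Jsmn/S/Alloc.lean to THE FIXED IMAGE fixed/jsmn_s.bin (same bytes at the same addresses; binFS). Do not edit: edit the original and port again. -/
/-
  jsmn_s.bin: `jsmn_alloc_token` (62 bytes at 100040H, 16 instructions) and `jsmn_fill_token` (16 bytes at 10007EH, 5 instructions).
-/
import Prog.Jsmn.Fixed.Specs
import Prog.Jsmn.State
import Prog.Jsmn.Fixed.CodeFS
import X86.Derived.Prog.MemWords

namespace X86
namespace J6
namespace FS
open X86.User (CodeAt RegsKept Span FlagsOK Layout toNat_add_ofNat toNat_ofNat_lt' add_ofNat_add)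
open Jsmn JsmnFSBytes

set_option maxRecDepth 100000
set_option maxHeartbeats 4000000
set_option linter.unusedSimpArgs false
set_option linter.unusedVariables false

variable {n : User.Layout} {v0 : User.State} {ret pa tb : Word} {numTokens : Nat} {p : Parser} {ts : Tokens}

theorem alloc_reach (hp : AllocPre binFS n v0 ret pa tb numTokens p ts) : Reach n v0 (AllocPost binFS v0 ret pa tb numTokens p ts) := by
  v3_open hp
  j6f_bin
  have hcode := JsmnFS.tjfs_jsmn_alloc_token_code hp_call_img
  have htn : p.toknext < 2 ^ 32 := hp_parser_toknext ▸ User.Mem.readLE4_lt _ _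
  -- (the lea fact goes to the walk as a TERM: as a hypothesis in the context its UInt64 products make every `v3_omega` call of the walk explode)
  v3_walk hcode hp.call.fetch [hp_call_retAddr, hp_call_retlt, lea20_index p.toknext htn] until [0x10005b]
  · -- no room: return NULL
    have hge : p.toknext ≥ numTokens := by v3_omega
    refine Reach.done ?_
    unfold AllocPost
    rw [show allocToken binFS.cfg p ts numTokens = none by simp [allocToken, hge]]
    exact ⟨⟨by simp, by simp, RegsKept.saved (S := [.rax, .rcx, .rdx, .rsp]) (by v3_kept) rfl, by v3_same⟩, by simp, by simp⟩
  · -- tokens[toknext] initialised, toknext + 1 (cut at 10005BH: the four stores need `toknext < num_tokens` as a plain fact)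
    have hlt : p.toknext < numTokens := by v3_omega
    have hlt' : ¬ p.toknext ≥ numTokens := by omega
    have hmul := tokSize_mul_le Config.strictLinks (hp_tlen ▸ hlt : p.toknext < ts.length)
    rw [tokSize_strictLinks] at hmul
    clear hbr_10004b
    v3_walk hcodeW hp.call.fetch [hp_call_retAddr, hp_call_retlt]
    refine Reach.done ?_
    unfold AllocPost
    simp only [allocToken, hlt', if_false, binFS_cfg, tokSize_strictLinks, links_strictLinks, if_true, ↓reduceIte]
    have haddr : tb + UInt64.ofNat (20 * p.toknext) = tokAddr Config.strictLinks tb p.toknext := by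
      unfold tokAddr; rw [tokSize_strictLinks]
    refine ⟨⟨by simp [hretW], by simp, RegsKept.saved (S := [.rax, .rcx, .rdx, .rsp]) (by v3_kept) rfl, by unfold dataWins; v3_same⟩, ?_, ?_, ?_⟩
    · v3_regnorm; exact haddr
    · refine ⟨by v3_read, ?_, by v3_frame hp_parser_toksuper⟩
      v3_memnorm
      show _ = u32 ((p.toknext : Int) + 1)
      have : u32 ((p.toknext : Int) + 1) = (p.toknext + 1) % 4294967296 := by unfold u32; omega
      rw [this]
      v3_read
    · v3_memnorm
      refine TokensAt.update hp_toks (hp_tlen ▸ hlt) (by rw [tokSize_strictLinks, hp_tlen]; v3_omega) (by rw [tokSize_strictLinks]; v3_eqon) (by rw [tokSize_strictLinks, hp_tlen]; v3_eqon) ?_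
      have ht0 := hp_toks.getD p.toknext (hp_tlen ▸ hlt)
      rw [← haddr] at ht0 ⊢
      have ht0t := ht0.type
      refine ⟨by v3_frame ht0t, holds32_read (by v3_read) holds32_neg1, holds32_read (by v3_read) holds32_neg1, holds32_read (by v3_read) holds32_zero,
        fun _ => holds32_read (by v3_read) holds32_neg1⟩

theorem alloc_spec (n : User.Layout) : AllocSpec binFS n := fun _ _ _ _ _ _ _ h => alloc_reach h

theorem fill_reach {i type : Nat} {start «end» : Int} (hp : FillPre binFS n v0 ret tb ts i type start «end») :
    Reach n v0 (FillPost binFS v0 ret tb ts i type start «end») := by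
  v3_open hp
  j6f_bin
  have hcode := JsmnFS.tjfs_jsmn_fill_token_code hp_call_img
  have hmul := tokSize_mul_le Config.strictLinks hp_ilt
  rw [tokSize_strictLinks] at hmul
  have haddr : tokAddr Config.strictLinks tb i = tb + UInt64.ofNat (20 * i) := by unfold tokAddr; rw [tokSize_strictLinks]
  rw [haddr] at hp_rdi
  v3_walk hcode hp.call.fetch [hp_call_retAddr, hp_call_retlt]
  refine Reach.done ?_
  unfold FillPost
  simp only [binFS_cfg, tokSize_strictLinks]
  refine ⟨⟨by simp [hretW], by simp, RegsKept.saved (S := [.rsp]) (by v3_kept) rfl, by v3_same⟩, ?_⟩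
  v3_memnorm
  rw [hp_rsi, hp_rdx, hp_rcx]
  have hu1 := u32_lt start
  have hu2 := u32_lt «end»
  refine TokensAt.update hp_toks hp_ilt (by rw [tokSize_strictLinks]; v3_omega) (by rw [tokSize_strictLinks]; v3_eqon) (by rw [tokSize_strictLinks]; v3_eqon) ?_
  rw [haddr]
  have ht0 := hp_toks.getD i hp_ilt
  have htl : (UInt64.ofNat type).toNat = type := by v3_omega
  rw [htl]
  refine ⟨by dsimp only [fillToken]; v3_read, holds32_read (raw := u32 start) (by v3_read) (holds32_of_range _ hp.startR.1 hp.startR.2),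
    holds32_read (raw := u32 «end») (by v3_read) (holds32_of_range _ hp.endR.1 hp.endR.2), holds32_read (by v3_read) holds32_zero,
    fun _ => ?_⟩
  have := (hp_toks.getD i hp_ilt).parent rfl
  rw [haddr] at this
  dsimp only [fillToken]
  v3_frame this

theorem fill_spec (n : User.Layout) : FillSpec binFS n := fun _ _ _ _ _ _ _ _ h => fill_reach h

end FS
end J6
end X86
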